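-- pv_equiv track=rewrite | github.com/trixirt/rocFFT | scripts/perf/perflib/html.py | token_to_length
-- ===== SOURCE A (Python) =====
-- def token_to_length(tokens):
--     length = []
--     for token in tokens:
--         words = token.split("_")
--         for idx in range(len(words)):
--             if(words[idx] == "len"):
--                 lenidx = idx + 1
--                 thislength = []
--                 while lenidx < len(words) and words[lenidx].isnumeric():
--                     thislength.append(int(words[lenidx]))
--                     lenidx += 1
--                 length.append(thislength)
--     return length
-- ===== SOURCE B (Python) =====
-- def token_to_length(tokens):
--     length = []
--     for token in tokens:
--         active = None
--         for word in token.split("_"):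
--             if word == "len":
--                 active = []
--                 length.append(active)
--             elif word.isnumeric() and active is not None:
--                 active.append(int(word))
--             else:
--                 active = None
--     return length
-- ===== Notes on version B (the rewrite author's own statement) =====
-- stated objective: simpler
-- what changed: Replaces the nested index loop with inner while-scan by a single flat pass over the split words using an active-group state variable.
import Mathlib
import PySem

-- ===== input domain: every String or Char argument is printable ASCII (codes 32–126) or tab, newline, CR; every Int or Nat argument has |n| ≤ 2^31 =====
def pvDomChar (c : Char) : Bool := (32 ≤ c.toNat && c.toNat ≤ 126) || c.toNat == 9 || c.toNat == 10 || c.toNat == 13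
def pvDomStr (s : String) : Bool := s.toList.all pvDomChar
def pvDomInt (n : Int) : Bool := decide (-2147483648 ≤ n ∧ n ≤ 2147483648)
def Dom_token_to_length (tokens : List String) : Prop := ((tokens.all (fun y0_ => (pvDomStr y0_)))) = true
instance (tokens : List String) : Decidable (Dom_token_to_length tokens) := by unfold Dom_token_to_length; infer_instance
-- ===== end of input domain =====

-- B replaces A's nested index loop (with an inner while re-scan after every "len") by one
-- flat pass over the split words with an active-group state variable; objective: simpler.

-- shared primitives: `.isnumeric()` ported as strIsdigit (exact on the ASCII domain, where
-- isnumeric and isdigit coincide), `int(w)` as ofStr? with default (w is all digits, so some).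
def pvIsNum (w : String) : Bool := PySem.Str.strIsdigit w
def pvIntOf (w : String) : Int := (PySem.Int.ofStr? w).getD 0

-- ===== PORT A =====
-- inner `while lenidx < len(words) and words[lenidx].isnumeric(): thislength.append(...)`
def aWhile (ws : List String) (lenidx : Nat) (thislength : List Int) : List Int :=
  if h : lenidx < ws.length then
    if pvIsNum ws[lenidx] then aWhile ws (lenidx + 1) (thislength ++ [pvIntOf ws[lenidx]])
    else thislength
  else thislength
termination_by ws.length - lenidx

-- `for idx in range(len(words)):` with the accumulated outer `length`
def aFor (ws : List String) (idx : Nat) (length : List (List Int)) : List (List Int) :=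
  if h : idx < ws.length then
    aFor ws (idx + 1)
      (if ws[idx] = "len" then length ++ [aWhile ws (idx + 1) []] else length)
  else length
termination_by ws.length - idx

-- `token.split("_")`: sep "_" ≠ "", so split? is always some
def pvSplit (token : String) : List String := (PySem.Str.split? token "_").getD []

def token_to_length (tokens : List String) : List (List Int) :=
  tokens.foldl (fun length token => aFor (pvSplit token) 0 length) []

-- ===== PORT B =====
-- Python B mutates the group list aliased as the last element of `length`;
-- modeled as (length, active flag), appending to the last group while active.
def bAppendLast : List (List Int) → Int → List (List Int)
  | [], _ => []
  | [g], x => [g ++ [x]]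
  | g :: rest, x => g :: bAppendLast rest x

def bStep (st : List (List Int) × Bool) (w : String) : List (List Int) × Bool :=
  if w = "len" then (st.1 ++ [[]], true)
  else if pvIsNum w && st.2 then (bAppendLast st.1 (pvIntOf w), true)
  else (st.1, false)

def token_to_length_alt (tokens : List String) : List (List Int) :=
  tokens.foldl (fun length token => ((pvSplit token).foldl bStep (length, false)).1) []

-- ===== PRECONDITION & SPEC =====
def Spec_token_to_length (tokens : List String) (out : List (List Int)) : Prop := out = token_to_length_alt tokens
instance (tokens : List String) (out : List (List Int)) : Decidable (Spec_token_to_length tokens out) := by unfold Spec_token_to_length; infer_instance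

-- ===== CLAIM (what is proved, stated in full; the proofs are below) =====
def Claim_equal_token_to_length : Prop := ∀ (tokens : List String), Dom_token_to_length tokens → Spec_token_to_length tokens (token_to_length tokens)

-- ===== LEMMAS AND PROOFS =====

-- the maximal numeric run, as ints
def pvNums (ws : List String) : List Int := (ws.takeWhile pvIsNum).map pvIntOf

-- structural version of A's outer loop
def aGo : List String → List (List Int) → List (List Int)
  | [], acc => acc
  | w :: rest, acc => aGo rest (if w = "len" then acc ++ [pvNums rest] else acc)

theorem aWhile_eq (ws : List String) (i : Nat) (acc : List Int) :
    aWhile ws i acc = acc ++ pvNums (ws.drop i) := by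
  induction i, acc using aWhile.induct ws with
  | case1 i acc h hn ih =>
    rw [aWhile, dif_pos h, if_pos hn, ih, List.drop_eq_getElem_cons h]
    simp only [pvNums, List.takeWhile_cons, hn, if_true, List.map_cons,
      List.append_assoc, List.singleton_append]
  | case2 i acc h hn =>
    have hn' : pvIsNum ws[i] = false := by simpa using hn
    rw [aWhile, dif_pos h, if_neg hn, List.drop_eq_getElem_cons h]
    simp only [pvNums, List.takeWhile_cons, hn', Bool.false_eq_true, if_false,
      List.map_nil, List.append_nil]
  | case3 i acc h =>
    rw [aWhile, dif_neg h, List.drop_eq_nil_of_le (by omega)]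
    simp [pvNums]

theorem aFor_eq (ws : List String) (i : Nat) (acc : List (List Int)) :
    aFor ws i acc = aGo (ws.drop i) acc := by
  induction i, acc using aFor.induct ws with
  | case1 i acc h ih =>
    rw [aFor, dif_pos h]
    by_cases hl : ws[i] = "len"
    · simp only [hl, if_true, dite_eq_ite, ite_true] at ih ⊢
      rw [ih, List.drop_eq_getElem_cons h, aGo, if_pos hl, aWhile_eq]
      simp only [List.nil_append]
    · simp only [hl, if_false, dite_eq_ite, ite_false] at ih ⊢
      rw [ih, List.drop_eq_getElem_cons h, aGo, if_neg hl]
  | case2 i acc h =>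
    rw [aFor, dif_neg h, List.drop_eq_nil_of_le (by omega), aGo]

theorem bAppendLast_append (acc : List (List Int)) (g : List Int) (x : Int) :
    bAppendLast (acc ++ [g]) x = acc ++ [g ++ [x]] := by
  induction acc with
  | nil => rfl
  | cons a as ih =>
    cases as with
    | nil => simp [bAppendLast]
    | cons b bs => simpa [bAppendLast] using ih

theorem pvIsNum_len : pvIsNum "len" = false := by decide

-- mutual invariant: the inactive fold is aGo; the active fold first finishes the open group
theorem bFold_inv (ws : List String) :
    (∀ acc, (ws.foldl bStep (acc, false)).1 = aGo ws acc) ∧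
    (∀ acc g, (ws.foldl bStep (acc ++ [g], true)).1 = aGo ws (acc ++ [g ++ pvNums ws])) := by
  induction ws with
  | nil => exact ⟨fun acc => rfl, fun acc g => by simp [pvNums, aGo]⟩
  | cons w rest ih =>
    constructor
    · intro acc
      by_cases hl : w = "len"
      · subst hl
        simp only [List.foldl_cons, bStep, if_pos rfl, aGo]
        exact ih.2 acc []
      · simp [List.foldl_cons, bStep, hl, aGo, ih.1]
    · intro acc g
      by_cases hl : w = "len"
      · subst hl
        simp only [List.foldl_cons, bStep, if_pos rfl, aGo, pvNums,
          List.takeWhile_cons, pvIsNum_len]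
        simpa [List.append_assoc] using ih.2 (acc ++ [g]) []
      · by_cases hn : pvIsNum w = true
        · simp only [List.foldl_cons, bStep, if_neg hl, hn, Bool.true_and, if_pos rfl,
            bAppendLast_append, aGo, pvNums, List.takeWhile_cons, hn, List.map_cons]
          simpa [pvNums] using ih.2 acc (g ++ [pvIntOf w])
        · have hn' : pvIsNum w = false := by simpa using hn
          simp [List.foldl_cons, bStep, hl, hn', aGo, pvNums, List.takeWhile_cons, ih.1]

theorem token_eq (t : String) (acc : List (List Int)) :
    aFor (pvSplit t) 0 acc = (((pvSplit t).foldl bStep (acc, false)).1) := by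
  rw [aFor_eq, List.drop_zero, (bFold_inv _).1]

-- ===== VERDICT (by name: the statement is the Claim_ definition above) =====
theorem token_to_length_spec : Claim_equal_token_to_length := by
  intro tokens _
  unfold Spec_token_to_length token_to_length token_to_length_alt
  induction tokens using List.reverseRecOn with
  | nil => rfl
  | append_singleton ts t ih => simp [List.foldl_append, ih, token_eq]
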